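-- pv_equiv track=rewrite | github.com/wolftales/srd-builder | src/srd_builder/extract/extract_magic_items.py | _merge_multipage_items
-- ===== SOURCE A (Python) =====
-- from typing import Any
--
-- MIN_DESCRIPTION_LENGTH = 20
--
-- def _merge_multipage_items(items: list[dict[str, Any]]) -> list[dict[str, Any]]:
--     """Merge items that span multiple pages.
--
--     Items are merged if they appear incomplete (no metadata or very short description).
--
--     Args:
--         items: List of raw item dictionaries
--
--     Returns:
--         List of merged items
--     """
--     if not items:
--         return []
--
--     merged: list[dict[str, Any]] = []
--     current = items[0]
--
--     for next_item in items[1:]: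
--         # Check if current item looks incomplete
--         current_desc_len = sum(
--             len(s.get("text", "")) for s in current.get("description_blocks", [])
--         )
--         has_metadata = len(current.get("metadata_blocks", [])) > 0
--
--         # If current is very short and has no metadata, it might be incomplete
--         if current_desc_len < MIN_DESCRIPTION_LENGTH and not has_metadata:
--             # Merge into next_item (current was probably a continuation)
--             next_item["description_blocks"] = current.get("description_blocks", []) + next_item.get(
--                 "description_blocks", []
--             )
--         else:
--             # Current looks complete, save it
--             merged.append(current)
--
--         current = next_item
--
--     # Add last item
--     merged.append(current)
--
--     return merged
-- ===== SOURCE B (Python) =====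
-- from typing import Any
--
-- MIN_DESCRIPTION_LENGTH = 20
--
-- def _merge_multipage_items(items: list[dict[str, Any]]) -> list[dict[str, Any]]:
--     """Two staged passes instead of A's online merge: first partition the items
--     into maximal merge chains (lists of the ORIGINAL items) using a running
--     description length, then build one merged item per chain by flattening the
--     chain's description blocks. (Return value only: A mutates every merged-into
--     dict along a chain, B mutates only the chain's last dict.)"""
--     if not items:
--         return []
--     # Pass 1: partition items[:-1] into chains; the last item closes the open chain.
--     groups: list[list[dict[str, Any]]] = []
--     chain: list[dict[str, Any]] = []
--     run = 0
--     for it in items[:-1]: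
--         chain.append(it)
--         run += sum(len(b.get("text", "")) for b in it.get("description_blocks", []))
--         if run >= MIN_DESCRIPTION_LENGTH or it.get("metadata_blocks", []):
--             groups.append(chain)
--             chain = []
--             run = 0
--     groups.append(chain + [items[-1]])
--     # Pass 2: each chain becomes its last item carrying the chain's flattened blocks.
--     out: list[dict[str, Any]] = []
--     for g in groups:
--         it = g[-1]
--         if len(g) > 1:
--             it["description_blocks"] = [b for x in g for b in x.get("description_blocks", [])]
--         out.append(it)
--     return out
-- ===== Notes on version B (the rewrite author's own statement) =====
-- stated objective: alternative
-- what changed: B replaces A's online merge (carrying a partially-merged dict and re-summing its accumulated blocks each iteration) by two staged passes: partition the original items into maximal merge chains with a running length, then map each chain to its last item carrying the chain's flattened description blocks.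
import Mathlib
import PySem

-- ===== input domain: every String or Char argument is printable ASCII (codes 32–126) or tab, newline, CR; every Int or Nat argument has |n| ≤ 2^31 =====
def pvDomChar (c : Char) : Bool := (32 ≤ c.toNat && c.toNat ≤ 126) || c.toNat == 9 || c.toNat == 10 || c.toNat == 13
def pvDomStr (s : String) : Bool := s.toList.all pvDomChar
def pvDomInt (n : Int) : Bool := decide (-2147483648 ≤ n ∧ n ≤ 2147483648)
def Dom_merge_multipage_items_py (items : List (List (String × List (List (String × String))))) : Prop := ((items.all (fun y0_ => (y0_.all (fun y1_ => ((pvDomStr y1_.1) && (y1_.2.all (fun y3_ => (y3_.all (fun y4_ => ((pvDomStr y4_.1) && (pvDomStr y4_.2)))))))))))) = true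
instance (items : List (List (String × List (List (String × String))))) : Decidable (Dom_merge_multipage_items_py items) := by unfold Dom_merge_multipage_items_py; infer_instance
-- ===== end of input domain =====

-- B replaces A's online merge (carrying the partially-merged dict and re-summing its blocks each
-- iteration) by two staged passes: partition the items into maximal merge chains, then map each
-- chain to its last item carrying the chain's flattened description blocks.
-- Both Pythons mutate input dicts (A every merged-into dict, B only each chain's last dict);
-- the equivalence proved here is about the RETURN value only.

abbrev pvItem : Type := List (String × List (List (String × String)))

-- shared sub-expressions both Pythons contain:
-- it.get("description_blocks", []) and sum(len(b.get("text", "")) for b in bs)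
def pvBlocks (it : pvItem) : List (List (String × String)) :=
  (PySem.Dict.mk it).getD "description_blocks" []

def pvDescLen (bs : List (List (String × String))) : Int :=
  bs.foldl (fun s b => s + PySem.Str.len ((PySem.Dict.mk b).getD "text" "")) 0

-- ===== PORT A =====
-- loop body of A: state (merged, current), one next_item
def pvStepA (acc : List pvItem × pvItem) (next_item : pvItem) : List pvItem × pvItem :=
  let merged := acc.1
  let current := acc.2
  let current_desc_len := pvDescLen (pvBlocks current)
  let has_metadata := ((PySem.Dict.mk current).getD "metadata_blocks" []).length > 0
  if current_desc_len < 20 ∧ ¬ has_metadata then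
    (merged,
     ((PySem.Dict.mk next_item).insert "description_blocks"
        (pvBlocks current ++ pvBlocks next_item)).items)
  else
    (merged ++ [current], next_item)

def merge_multipage_items_py (items : List (List (String × List (List (String × String))))) : List (List (String × List (List (String × String)))) :=
  match items with
  | [] => []
  | first :: rest =>
    let st := rest.foldl pvStepA ([], first)
    st.1 ++ [st.2]

-- ===== PORT B =====
-- pass-1 loop body: state (groups, chain, run); append it to the open chain, close it if complete
def pvGroupStep (acc : List (List pvItem) × List pvItem × Int) (it : pvItem) :
    List (List pvItem) × List pvItem × Int :=
  let chain := acc.2.1 ++ [it]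
  let run := acc.2.2 + pvDescLen (pvBlocks it)
  if 20 ≤ run ∨ (PySem.Dict.mk it).getD "metadata_blocks" [] ≠ [] then
    (acc.1 ++ [chain], [], 0)
  else
    (acc.1, chain, run)

-- pass-2 body: a chain becomes its last item carrying the chain's flattened blocks
def pvBuildChain (g : List pvItem) : pvItem :=
  match g.getLast? with
  | none => []
  | some it =>
    if 1 < g.length then
      ((PySem.Dict.mk it).insert "description_blocks" (g.flatMap pvBlocks)).items
    else it

def merge_multipage_items_py_alt (items : List (List (String × List (List (String × String))))) : List (List (String × List (List (String × String)))) :=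
  match items with
  | [] => []
  | first :: rest =>
    let st := ((first :: rest).dropLast).foldl pvGroupStep ([], [], 0)
    let groups := st.1 ++ [st.2.1 ++ [(first :: rest).getLastD []]]
    groups.map pvBuildChain

-- ===== PRECONDITION & SPEC =====
def Spec_merge_multipage_items_py (items : List (List (String × List (List (String × String))))) (out : List (List (String × List (List (String × String))))) : Prop := out = merge_multipage_items_py_alt items
instance (items : List (List (String × List (List (String × String))))) (out : List (List (String × List (List (String × String))))) : Decidable (Spec_merge_multipage_items_py items out) := by unfold Spec_merge_multipage_items_py; infer_instance

-- ===== CLAIM (what is proved, stated in full; the proofs are below) =====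
def Claim_equal_merge_multipage_items_py : Prop := ∀ (items : List (List (String × List (List (String × String))))), Dom_merge_multipage_items_py items → Spec_merge_multipage_items_py items (merge_multipage_items_py items)

-- ===== LEMMAS AND PROOFS =====

theorem pvDescLen_shift (bs : List (List (String × String))) (a : Int) :
    bs.foldl (fun s b => s + PySem.Str.len ((PySem.Dict.mk b).getD "text" "")) a
      = a + pvDescLen bs := by
  induction bs generalizing a with
  | nil => simp [pvDescLen]
  | cons b t ih =>
    simp only [List.foldl_cons, pvDescLen]
    rw [ih, ih]
    ring

theorem pvDescLen_append (xs ys : List (List (String × String))) :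
    pvDescLen (xs ++ ys) = pvDescLen xs + pvDescLen ys := by
  simp only [pvDescLen, List.foldl_append]
  rw [pvDescLen_shift]
  rfl

-- pvBuildChain on a nonempty chain, in closed form
theorem pvBuildChain_append (c : List pvItem) (it : pvItem) :
    pvBuildChain (c ++ [it]) =
      if c = [] then it
      else ((PySem.Dict.mk it).insert "description_blocks"
              (c.flatMap pvBlocks ++ pvBlocks it)).items := by
  cases c with
  | nil => simp [pvBuildChain]
  | cons a t =>
    have h : (a :: (t ++ [it])).getLast? = some it := by
      rw [← List.cons_append]; exact List.getLast?_concat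
    simp [pvBuildChain, h]

theorem pvBlocks_buildChain (c : List pvItem) (it : pvItem) :
    pvBlocks (pvBuildChain (c ++ [it])) = (c ++ [it]).flatMap pvBlocks := by
  rw [pvBuildChain_append]
  cases c with
  | nil => simp
  | cons a t =>
    rw [if_neg (List.cons_ne_nil a t)]
    show ((PySem.Dict.mk it).insert "description_blocks" _).getD "description_blocks" []
          = _
    rw [PySem.Dict.getD_insert_self]
    simp [List.flatMap_append]

theorem pvMeta_buildChain (c : List pvItem) (it : pvItem) :
    (PySem.Dict.mk (pvBuildChain (c ++ [it]))).getD "metadata_blocks" []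
      = (PySem.Dict.mk it).getD "metadata_blocks" [] := by
  rw [pvBuildChain_append]
  cases c with
  | nil => simp
  | cons a t =>
    rw [if_neg (List.cons_ne_nil a t)]
    show ((PySem.Dict.mk it).insert "description_blocks" _).getD "metadata_blocks" [] = _
    rw [PySem.Dict.getD_insert_of_ne]
    decide

-- the main invariant: A's fold from (g.map build, build (c ++ [first])) matches B's staged
-- computation from (g, c, descLen (flat c)) over the remaining items
theorem pvMain (xs : List pvItem) (first : pvItem) (g : List (List pvItem)) (c : List pvItem) :
    ((xs.foldl pvStepA (g.map pvBuildChain, pvBuildChain (c ++ [first]))).1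
      ++ [(xs.foldl pvStepA (g.map pvBuildChain, pvBuildChain (c ++ [first]))).2])
    = (let st := ((first :: xs).dropLast).foldl pvGroupStep (g, c, pvDescLen (c.flatMap pvBlocks));
       (st.1 ++ [st.2.1 ++ [(first :: xs).getLastD []]]).map pvBuildChain) := by
  induction xs generalizing first g c with
  | nil => simp
  | cons y ys ih =>
    have hdrop : (first :: y :: ys).dropLast = first :: (y :: ys).dropLast := rfl
    have hlast : (first :: y :: ys).getLastD [] = (y :: ys).getLastD [] := rfl
    rw [hdrop, hlast]
    simp only [List.foldl_cons]
    have hrun : pvDescLen (c.flatMap pvBlocks) + pvDescLen (pvBlocks first)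
        = pvDescLen ((c ++ [first]).flatMap pvBlocks) := by
      rw [List.flatMap_append, pvDescLen_append]; simp
    by_cases hcond : 20 ≤ pvDescLen ((c ++ [first]).flatMap pvBlocks)
        ∨ (PySem.Dict.mk first).getD "metadata_blocks" [] ≠ []
    · -- chain closes: A emits current, B closes the chain
      have hA : pvStepA (g.map pvBuildChain, pvBuildChain (c ++ [first])) y
          = ((g ++ [c ++ [first]]).map pvBuildChain, pvBuildChain ([] ++ [y])) := by
        simp only [pvStepA, pvBlocks_buildChain, pvMeta_buildChain]
        rw [if_neg]
        · simp [pvBuildChain]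
        · rcases hcond with h | h
          · exact fun hh => absurd hh.1 (by omega)
          · exact fun hh => h (by
              have := hh.2
              simp only [gt_iff_lt, Nat.pos_iff_ne_zero, ne_eq, not_not] at this
              exact List.length_eq_zero_iff.mp this)
      have hB : pvGroupStep (g, c, pvDescLen (c.flatMap pvBlocks)) first
          = (g ++ [c ++ [first]], [], 0) := by
        simp only [pvGroupStep, hrun]
        rw [if_pos hcond]
      rw [hA, hB]
      have h0 : (0 : Int) = pvDescLen (([] : List pvItem).flatMap pvBlocks) := rfl
      rw [h0]
      exact ih y (g ++ [c ++ [first]]) []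
    · -- chain continues: A merges into y, B extends the open chain
      push_neg at hcond
      have hA : pvStepA (g.map pvBuildChain, pvBuildChain (c ++ [first])) y
          = (g.map pvBuildChain, pvBuildChain ((c ++ [first]) ++ [y])) := by
        simp only [pvStepA, pvBlocks_buildChain, pvMeta_buildChain]
        rw [if_pos ⟨by omega, by simp [hcond.2]⟩]
        rw [pvBuildChain_append (c ++ [first]) y]
        rw [if_neg (by simp)]
      have hB : pvGroupStep (g, c, pvDescLen (c.flatMap pvBlocks)) first
          = (g, c ++ [first], pvDescLen ((c ++ [first]).flatMap pvBlocks)) := by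
        simp only [pvGroupStep, hrun]
        rw [if_neg (by push_neg; exact ⟨by omega, hcond.2⟩)]
      rw [hA, hB]
      exact ih y g (c ++ [first])

-- ===== VERDICT (by name: the statement is the Claim_ definition above) =====
theorem merge_multipage_items_py_spec : Claim_equal_merge_multipage_items_py := by
  intro items _
  unfold Spec_merge_multipage_items_py
  match items with
  | [] => rfl
  | first :: rest => exact pvMain rest first [] []
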